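-- pv_equiv track=rewrite | github.com/bronxbot/bot | cogs/help/help_utils.py | categorize_cog
-- ===== SOURCE A (Python) =====
-- def categorize_cog(cog_name: str) -> str:
--     """Determine which category a cog belongs to"""
--     categories = {
--         'Economy': ['Economy', 'Work', 'Shop', 'Bazaar', 'Giveaway', 'Trading'],
--         'Fun & Games': ['Fun', 'Text', 'MathRace', 'TicTacToe', 'Multiplayer', 'Cypher'],
--         'Music': ['Music', 'MusicControls', 'MusicPlayer', 'MusicQueue'],
--         'Moderation': ['Moderation', 'VoteBans', 'AutoMod'],
--         'Utility': ['Utility', 'Help', 'Stats', 'Status'],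
--         'Economy - Fishing': ['FishingCore', 'FishingStats', 'FishingSelling', 'FishingInventory', 'AutoFishing'],
--         'Economy - Gambling': ['Gambling', 'CardGames', 'ChanceGames', 'SpecialGames', 'Plinko'],
--         'Settings': ['ServerSettings', 'GeneralSettings', 'ModerationSettings', 'WelcomeSettings', 'LoggingSettings', 'EconomySettings', 'MusicSettings'],
--         'Admin': ['Admin', 'Performance', 'SyncRoles'],
--         'Special': ['AI', 'Welcoming', 'Reminders', 'SetupWizard', 'ModMail']
--     }
--
--     for category, cogs in categories.items():
--         if cog_name in cogs:
--             return category
--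
--     return 'Other'
-- ===== SOURCE B (Python) =====
-- """Flat cog->category dict literal; a single hash lookup instead of scanning category lists."""
--
-- _COG_TO_CATEGORY = {
--     'Economy': 'Economy',
--     'Work': 'Economy',
--     'Shop': 'Economy',
--     'Bazaar': 'Economy',
--     'Giveaway': 'Economy',
--     'Trading': 'Economy',
--     'Fun': 'Fun & Games',
--     'Text': 'Fun & Games',
--     'MathRace': 'Fun & Games',
--     'TicTacToe': 'Fun & Games',
--     'Multiplayer': 'Fun & Games',
--     'Cypher': 'Fun & Games',
--     'Music': 'Music',
--     'MusicControls': 'Music',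
--     'MusicPlayer': 'Music',
--     'MusicQueue': 'Music',
--     'Moderation': 'Moderation',
--     'VoteBans': 'Moderation',
--     'AutoMod': 'Moderation',
--     'Utility': 'Utility',
--     'Help': 'Utility',
--     'Stats': 'Utility',
--     'Status': 'Utility',
--     'FishingCore': 'Economy - Fishing',
--     'FishingStats': 'Economy - Fishing',
--     'FishingSelling': 'Economy - Fishing',
--     'FishingInventory': 'Economy - Fishing',
--     'AutoFishing': 'Economy - Fishing',
--     'Gambling': 'Economy - Gambling',
--     'CardGames': 'Economy - Gambling',
--     'ChanceGames': 'Economy - Gambling',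
--     'SpecialGames': 'Economy - Gambling',
--     'Plinko': 'Economy - Gambling',
--     'ServerSettings': 'Settings',
--     'GeneralSettings': 'Settings',
--     'ModerationSettings': 'Settings',
--     'WelcomeSettings': 'Settings',
--     'LoggingSettings': 'Settings',
--     'EconomySettings': 'Settings',
--     'MusicSettings': 'Settings',
--     'Admin': 'Admin',
--     'Performance': 'Admin',
--     'SyncRoles': 'Admin',
--     'AI': 'Special',
--     'Welcoming': 'Special',
--     'Reminders': 'Special',
--     'SetupWizard': 'Special',
--     'ModMail': 'Special',
-- }
--
--
-- def categorize_cog(cog_name: str) -> str: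
--     """Determine which category a cog belongs to"""
--     return _COG_TO_CATEGORY.get(cog_name, 'Other')
-- ===== Notes on version B (the rewrite author's own statement) =====
-- stated objective: idiomatic
-- what changed: The nested per-call scan over category lists is replaced by a flat literal cog->category dict (the inverted table written out once), so the function body is a single dict .get with a default and no loop at all.
import Mathlib
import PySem

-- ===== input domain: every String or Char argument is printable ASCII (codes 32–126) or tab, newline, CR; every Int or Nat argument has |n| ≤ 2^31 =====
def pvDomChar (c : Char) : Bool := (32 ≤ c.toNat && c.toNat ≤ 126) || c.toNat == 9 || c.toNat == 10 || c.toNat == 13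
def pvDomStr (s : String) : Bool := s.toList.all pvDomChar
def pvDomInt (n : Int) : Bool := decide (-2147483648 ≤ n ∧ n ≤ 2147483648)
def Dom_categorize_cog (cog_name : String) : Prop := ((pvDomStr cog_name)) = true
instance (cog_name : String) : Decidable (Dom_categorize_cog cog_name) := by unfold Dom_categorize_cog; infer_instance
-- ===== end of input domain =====

-- B replaces A's per-call nested scan over the category table by a flat literal
-- cog->category dict and one .get lookup (objective: idiomatic).

-- ===== PORT A =====
-- A's literal categories dict
def pvCategories : List (String × List String) :=
  [("Economy", ["Economy", "Work", "Shop", "Bazaar", "Giveaway", "Trading"]),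
   ("Fun & Games", ["Fun", "Text", "MathRace", "TicTacToe", "Multiplayer", "Cypher"]),
   ("Music", ["Music", "MusicControls", "MusicPlayer", "MusicQueue"]),
   ("Moderation", ["Moderation", "VoteBans", "AutoMod"]),
   ("Utility", ["Utility", "Help", "Stats", "Status"]),
   ("Economy - Fishing", ["FishingCore", "FishingStats", "FishingSelling", "FishingInventory", "AutoFishing"]),
   ("Economy - Gambling", ["Gambling", "CardGames", "ChanceGames", "SpecialGames", "Plinko"]),
   ("Settings", ["ServerSettings", "GeneralSettings", "ModerationSettings", "WelcomeSettings", "LoggingSettings", "EconomySettings", "MusicSettings"]),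
   ("Admin", ["Admin", "Performance", "SyncRoles"]),
   ("Special", ["AI", "Welcoming", "Reminders", "SetupWizard", "ModMail"])]

-- A's loop: first category whose cog list contains cog_name, else 'Other'
def pvCatLoop (cog_name : String) : List (String × List String) → String
  | [] => "Other"
  | (category, cogs) :: rest =>
      if cogs.contains cog_name then category else pvCatLoop cog_name rest

def categorize_cog (cog_name : String) : String := pvCatLoop cog_name pvCategories

-- ===== PORT B =====
-- B's flat literal dict _COG_TO_CATEGORY (distinct keys, written out in Source B)
def pvFlatPairs : List (String × String) :=
  [("Economy", "Economy"),
   ("Work", "Economy"),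
   ("Shop", "Economy"),
   ("Bazaar", "Economy"),
   ("Giveaway", "Economy"),
   ("Trading", "Economy"),
   ("Fun", "Fun & Games"),
   ("Text", "Fun & Games"),
   ("MathRace", "Fun & Games"),
   ("TicTacToe", "Fun & Games"),
   ("Multiplayer", "Fun & Games"),
   ("Cypher", "Fun & Games"),
   ("Music", "Music"),
   ("MusicControls", "Music"),
   ("MusicPlayer", "Music"),
   ("MusicQueue", "Music"),
   ("Moderation", "Moderation"),
   ("VoteBans", "Moderation"),
   ("AutoMod", "Moderation"),
   ("Utility", "Utility"),
   ("Help", "Utility"),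
   ("Stats", "Utility"),
   ("Status", "Utility"),
   ("FishingCore", "Economy - Fishing"),
   ("FishingStats", "Economy - Fishing"),
   ("FishingSelling", "Economy - Fishing"),
   ("FishingInventory", "Economy - Fishing"),
   ("AutoFishing", "Economy - Fishing"),
   ("Gambling", "Economy - Gambling"),
   ("CardGames", "Economy - Gambling"),
   ("ChanceGames", "Economy - Gambling"),
   ("SpecialGames", "Economy - Gambling"),
   ("Plinko", "Economy - Gambling"),
   ("ServerSettings", "Settings"),
   ("GeneralSettings", "Settings"),
   ("ModerationSettings", "Settings"),
   ("WelcomeSettings", "Settings"),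
   ("LoggingSettings", "Settings"),
   ("EconomySettings", "Settings"),
   ("MusicSettings", "Settings"),
   ("Admin", "Admin"),
   ("Performance", "Admin"),
   ("SyncRoles", "Admin"),
   ("AI", "Special"),
   ("Welcoming", "Special"),
   ("Reminders", "Special"),
   ("SetupWizard", "Special"),
   ("ModMail", "Special")]

def pvCogToCategory : PySem.Dict String String := PySem.Dict.mk pvFlatPairs

def categorize_cog_alt (cog_name : String) : String :=
  pvCogToCategory.getD cog_name "Other"

-- ===== PRECONDITION & SPEC =====
def Spec_categorize_cog (cog_name : String) (out : String) : Prop := out = categorize_cog_alt cog_name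
instance (cog_name : String) (out : String) : Decidable (Spec_categorize_cog cog_name out) := by unfold Spec_categorize_cog; infer_instance

-- ===== CLAIM (what is proved, stated in full; the proofs are below) =====
def Claim_equal_categorize_cog : Prop := ∀ (cog_name : String), Dom_categorize_cog cog_name → Spec_categorize_cog cog_name (categorize_cog cog_name)

-- ===== LEMMAS AND PROOFS =====

-- looking up in a dict literal whose front block maps every cog of one list to cat
lemma pv_get_block (cog cat : String) (cs : List String) (tail : List (String × String)) :
    (PySem.Dict.mk (cs.map (fun c => (c, cat)) ++ tail)).get? cog
      = if cs.contains cog then some cat else (PySem.Dict.mk tail).get? cog := by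
  induction cs with
  | nil => simp
  | cons c cs ih =>
    rw [List.map_cons, List.cons_append, PySem.Dict.get?_mk_cons, ih]
    by_cases hc : cog = c
    · subst hc; simp
    · have hb : (c == cog) = false := beq_eq_false_iff_ne.mpr (Ne.symm hc)
      simp [hb, hc]

-- the flattened table, as a dict literal, computes A's loop
lemma pv_get_flatten (cog : String) (t : List (String × List String)) :
    (PySem.Dict.mk (t.flatMap (fun p => p.2.map (fun c => (c, p.1))))).getD cog "Other"
      = pvCatLoop cog t := by
  induction t with
  | nil => simp [pvCatLoop, PySem.Dict.getD_eq_get?_getD, PySem.Dict.get?]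
  | cons p t ih =>
    obtain ⟨cat, cogs⟩ := p
    rw [List.flatMap_cons, PySem.Dict.getD_eq_get?_getD, pv_get_block, pvCatLoop]
    by_cases hm : cog ∈ cogs
    · simp [hm]
    · have hc : cogs.contains cog = false := by simpa using hm
      simp only [hc, Bool.false_eq_true, if_false, ← PySem.Dict.getD_eq_get?_getD, ih]

-- B's literal flat list is exactly the flattening of A's table
lemma pv_flat_eq : pvFlatPairs = pvCategories.flatMap (fun p => p.2.map (fun c => (c, p.1))) := by
  rfl

-- ===== VERDICT (by name: the statement is the Claim_ definition above) =====
theorem categorize_cog_spec : Claim_equal_categorize_cog := by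
  intro cog _
  unfold Spec_categorize_cog categorize_cog categorize_cog_alt pvCogToCategory
  rw [pv_flat_eq, pv_get_flatten]
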